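-- pv_equiv track=rewrite | github.com/miliar/Code_Jam_Webscraper | Solutions_python/Problem_193/36.py | compute_sol_cost
-- ===== SOURCE A (Python) =====
-- def compute_sol_cost(sets, solution):
--   cost = 0
--   for i in range(len(sets)):
--     for j in range(i + 1, len(sets)):
--       if solution[i] == solution[j]:
--         cost += sets[i][0] * sets[j][1]
--         cost += sets[i][1] * sets[j][0]
--   return cost
-- ===== SOURCE B (Python) =====
-- def compute_sol_cost(sets, solution):
--     # One pass: for each item, pair it with all earlier items of the same
--     # solution value via running sums kept per solution value.
--     sums = {}
--     cost = 0
--     for pair, s in zip(sets, solution):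
--         a, b = pair[0], pair[1]
--         sa, sb = sums.get(s, (0, 0))
--         cost += a * sb + b * sa
--         sums[s] = (sa + a, sb + b)
--     return cost
-- ===== Notes on version B (the rewrite author's own statement) =====
-- stated objective: faster
-- what changed: Replaced the O(n^2) all-pairs double loop with a single pass that keeps, per solution value, the running sums of first and second set components, adding a*sumB + b*sumA for each new item.
-- outside the precondition, e.g. on compute_sol_cost([(1, 2), (3,)], [0, 1]): A returns 0, B raises IndexError
import Mathlib
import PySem

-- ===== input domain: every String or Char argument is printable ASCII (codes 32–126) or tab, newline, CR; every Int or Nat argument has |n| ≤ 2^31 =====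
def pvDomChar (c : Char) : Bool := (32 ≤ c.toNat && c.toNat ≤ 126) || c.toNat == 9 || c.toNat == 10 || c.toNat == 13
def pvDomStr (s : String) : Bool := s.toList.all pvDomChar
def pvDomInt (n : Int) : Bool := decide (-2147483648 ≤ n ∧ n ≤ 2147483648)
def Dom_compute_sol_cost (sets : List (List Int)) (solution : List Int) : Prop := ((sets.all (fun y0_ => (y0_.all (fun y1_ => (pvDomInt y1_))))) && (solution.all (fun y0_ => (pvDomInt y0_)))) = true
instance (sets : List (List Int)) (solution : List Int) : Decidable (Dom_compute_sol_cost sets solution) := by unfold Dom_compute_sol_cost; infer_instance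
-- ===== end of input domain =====

-- B replaces A's all-pairs double loop by one pass keeping per-solution-value running sums.

-- ===== PORT A =====
def compute_sol_cost (sets : List (List Int)) (solution : List Int) : Int :=
  (PySem.List.pyRange 0 sets.length 1).foldl (fun cost i =>
    (PySem.List.pyRange (i + 1) sets.length 1).foldl (fun cost j =>
      if PySem.List.pyGetD solution i 0 = PySem.List.pyGetD solution j 0 then
        cost + PySem.List.pyGetD (PySem.List.pyGetD sets i []) 0 0 *
                 PySem.List.pyGetD (PySem.List.pyGetD sets j []) 1 0
             + PySem.List.pyGetD (PySem.List.pyGetD sets i []) 1 0 *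
                 PySem.List.pyGetD (PySem.List.pyGetD sets j []) 0 0
      else cost) cost) 0

-- ===== PORT B =====
-- the loop 'for pair, s in zip(sets, solution): …' of Source B, over running sums per solution value
def csLoop : List (List Int × Int) → PySem.Dict Int (Int × Int) → Int → Int
  | [], _, cost => cost
  | (pair, s) :: rest, sums, cost =>
    let a := PySem.List.pyGetD pair 0 0
    let b := PySem.List.pyGetD pair 1 0
    let p := sums.getD s (0, 0)
    csLoop rest (sums.insert s (p.1 + a, p.2 + b)) (cost + a * p.2 + b * p.1)

def compute_sol_cost_alt (sets : List (List Int)) (solution : List Int) : Int :=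
  csLoop (sets.zip solution) PySem.Dict.empty 0

-- ===== PRECONDITION & SPEC =====
-- Pre_ excludes exactly the inputs on which one of the two Pythons raises IndexError:
-- A raises when 2 ≤ len(sets) and len(solution) < len(sets); B reads pair[0]/pair[1] of every
-- set, so every set needs ≥ 2 elements (A returns on such inputs when the short set never
-- matches an equal solution value, B raises there — see the claim's cite).
def Pre_compute_sol_cost (sets : List (List Int)) (solution : List Int) : Prop :=
  (sets.length ≤ solution.length ∨ sets.length ≤ 1) ∧ ∀ s ∈ sets, 2 ≤ s.length
instance (sets : List (List Int)) (solution : List Int) : Decidable (Pre_compute_sol_cost sets solution) := by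
  unfold Pre_compute_sol_cost; infer_instance

def pvWitness_compute_sol_cost : List (List Int) × List Int :=
  ([[1, 2], [3, 4], [5, 6]], [0, 1, 0])

def Spec_compute_sol_cost (sets : List (List Int)) (solution : List Int) (out : Int) : Prop := out = compute_sol_cost_alt sets solution
instance (sets : List (List Int)) (solution : List Int) (out : Int) : Decidable (Spec_compute_sol_cost sets solution out) := by unfold Spec_compute_sol_cost; infer_instance

-- ===== CLAIM (what is proved, stated in full; the proofs are below) =====
def Claim_equal_compute_sol_cost : Prop := ∀ (sets : List (List Int)) (solution : List Int), Dom_compute_sol_cost sets solution → Pre_compute_sol_cost sets solution → Spec_compute_sol_cost sets solution (compute_sol_cost sets solution)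

-- ===== LEMMAS AND PROOFS =====

-- pairwise cost of a triple list (a, b, s): each head pairs with every later element of equal s
def pairs0 : List (Int × Int × Int) → Int
  | [] => 0
  | x :: r =>
    (r.map (fun y => if x.2.2 = y.2.2 then x.1 * y.2.1 + x.2.1 * y.1 else 0)).sum + pairs0 r

-- the triple A reads at index i
def trA (sets : List (List Int)) (solution : List Int) (i : Int) : Int × Int × Int :=
  (PySem.List.pyGetD (PySem.List.pyGetD sets i []) 0 0,
   PySem.List.pyGetD (PySem.List.pyGetD sets i []) 1 0,
   PySem.List.pyGetD solution i 0)

-- the triple B reads from a zipped pair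
def trB (x : List Int × Int) : Int × Int × Int :=
  (PySem.List.pyGetD x.1 0 0, PySem.List.pyGetD x.1 1 0, x.2)

-- A's pair contribution of indices (i, j)
def gA (sets : List (List Int)) (solution : List Int) (i j : Int) : Int :=
  if (trA sets solution i).2.2 = (trA sets solution j).2.2 then
    (trA sets solution i).1 * (trA sets solution j).2.1 +
    (trA sets solution i).2.1 * (trA sets solution j).1 else 0

lemma sum_map_split {α : Type} (l : List α) (u v : α → Int) :
    (l.map (fun y => u y + v y)).sum = (l.map u).sum + (l.map v).sum := by
  induction l with
  | nil => simp
  | cons x r ih => simp [ih]; ring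

lemma foldl_if_add2 (l : List Int) (c : Int) (cond : Int → Prop) [DecidablePred cond]
    (t1 t2 : Int → Int) :
    l.foldl (fun c j => if cond j then c + t1 j + t2 j else c) c
      = c + (l.map (fun j => if cond j then t1 j + t2 j else 0)).sum := by
  induction l generalizing c with
  | nil => simp
  | cons x xs ih =>
    simp only [List.foldl_cons, List.map_cons, List.sum_cons, ih]
    split_ifs <;> ring

lemma pairs0_append (l : List (Int × Int × Int)) (z : Int × Int × Int) :
    pairs0 (l ++ [z]) = pairs0 l +
      (l.map (fun x => if x.2.2 = z.2.2 then x.1 * z.2.1 + x.2.1 * z.1 else 0)).sum := by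
  induction l with
  | nil => simp [pairs0]
  | cons x r ih =>
    simp only [List.cons_append, pairs0, ih, List.map_append, List.map_cons, List.map_nil,
      List.sum_append, List.sum_cons, List.sum_nil]
    have hz : (if x.2.2 = z.2.2 then x.1 * z.2.1 + x.2.1 * z.1 else 0)
        = (if z.2.2 = x.2.2 then z.1 * x.2.1 + z.2.1 * x.1 else 0) := by
      by_cases h : x.2.2 = z.2.2
      · rw [if_pos h, if_pos h.symm]; ring
      · have hzx : ¬ z.2.2 = x.2.2 := fun h' => h h'.symm
        rw [if_neg h, if_neg hzx]
    rw [hz]; ring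

-- A as an explicit double sum over ranges
lemma A_eq_sum (sets : List (List Int)) (solution : List Int) :
    compute_sol_cost sets solution
      = ((PySem.List.pyRange 0 sets.length 1).map (fun i =>
          ((PySem.List.pyRange (i + 1) sets.length 1).map (gA sets solution i)).sum)).sum := by
  unfold compute_sol_cost
  have hinner : (fun (cost i : Int) =>
      (PySem.List.pyRange (i + 1) sets.length 1).foldl (fun cost j =>
        if PySem.List.pyGetD solution i 0 = PySem.List.pyGetD solution j 0 then
          cost + PySem.List.pyGetD (PySem.List.pyGetD sets i []) 0 0 *
                   PySem.List.pyGetD (PySem.List.pyGetD sets j []) 1 0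
               + PySem.List.pyGetD (PySem.List.pyGetD sets i []) 1 0 *
                   PySem.List.pyGetD (PySem.List.pyGetD sets j []) 0 0
        else cost) cost)
      = fun (cost i : Int) =>
          cost + ((PySem.List.pyRange (i + 1) sets.length 1).map (gA sets solution i)).sum := by
    funext cost i
    rw [foldl_if_add2]
    rfl
  rw [hinner, PySem.List.foldl_add]
  simp

-- the double range sum equals pairs0 of the triples along the range
lemma rangeSum_eq_pairs0 (sets : List (List Int)) (solution : List Int) (m : ℕ) :
    ((PySem.List.pyRange 0 (m : Int) 1).map (fun i =>
        ((PySem.List.pyRange (i + 1) (m : Int) 1).map (gA sets solution i)).sum)).sum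
      = pairs0 ((PySem.List.pyRange 0 (m : Int) 1).map (trA sets solution)) := by
  induction m with
  | zero =>
    simp [PySem.List.pyRange_one_eq_nil, pairs0]
  | succ m ih =>
    have hcast : ((m + 1 : ℕ) : Int) = (m : Int) + 1 := by push_cast; ring
    have hsplit : PySem.List.pyRange 0 ((m : Int) + 1) 1
        = PySem.List.pyRange 0 (m : Int) 1 ++ [(m : Int)] :=
      PySem.List.pyRange_one_succ_right (by positivity)
    rw [hcast, hsplit, List.map_append, List.map_append, List.sum_append]
    simp only [List.map_cons, List.map_nil]
    rw [pairs0_append]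
    have houter : (PySem.List.pyRange 0 (m : Int) 1).map (fun i =>
          ((PySem.List.pyRange (i + 1) ((m : Int) + 1) 1).map (gA sets solution i)).sum)
        = (PySem.List.pyRange 0 (m : Int) 1).map (fun i =>
          ((PySem.List.pyRange (i + 1) (m : Int) 1).map (gA sets solution i)).sum
            + gA sets solution i m) := by
      apply List.map_congr_left
      intro i hi
      rw [PySem.List.mem_pyRange_one] at hi
      rw [PySem.List.pyRange_one_succ_right (by omega), List.map_append, List.sum_append]
      simp
    rw [houter, sum_map_split, ih]
    have hlast : ((PySem.List.pyRange ((m : Int) + 1) ((m : Int) + 1) 1).map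
        (gA sets solution (m : Int))).sum = 0 := by
      rw [PySem.List.pyRange_one_eq_nil (le_refl _)]; simp
    have hmapmap : ((PySem.List.pyRange 0 (m : Int) 1).map (trA sets solution)).map
          (fun x => if x.2.2 = (trA sets solution (m : Int)).2.2 then
            x.1 * (trA sets solution (m : Int)).2.1 + x.2.1 * (trA sets solution (m : Int)).1 else 0)
        = (PySem.List.pyRange 0 (m : Int) 1).map (fun i => gA sets solution i (m : Int)) := by
      rw [List.map_map]
      rfl
    rw [hmapmap, hlast]
    simp

-- B's loop: cost plus pairwise cost plus cross terms against the incoming dict sums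
lemma csLoop_eq (l : List (List Int × Int)) (d : PySem.Dict Int (Int × Int)) (c : Int) :
    csLoop l d c = c + pairs0 (l.map trB)
      + (l.map (fun x => (trB x).1 * (d.getD (trB x).2.2 (0, 0)).2
          + (trB x).2.1 * (d.getD (trB x).2.2 (0, 0)).1)).sum := by
  induction l generalizing d c with
  | nil => simp [csLoop, pairs0]
  | cons x r ih =>
    obtain ⟨pair, s⟩ := x
    show csLoop ((pair, s) :: r) d c = _
    rw [csLoop, ih]
    have hterm : (r.map (fun y => (trB y).1 *
          ((d.insert s ((d.getD s (0,0)).1 + PySem.List.pyGetD pair 0 0,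
                        (d.getD s (0,0)).2 + PySem.List.pyGetD pair 1 0)).getD (trB y).2.2 (0, 0)).2
          + (trB y).2.1 * ((d.insert s ((d.getD s (0,0)).1 + PySem.List.pyGetD pair 0 0,
                        (d.getD s (0,0)).2 + PySem.List.pyGetD pair 1 0)).getD (trB y).2.2 (0, 0)).1))
        = r.map (fun y =>
            ((trB y).1 * (d.getD (trB y).2.2 (0, 0)).2 + (trB y).2.1 * (d.getD (trB y).2.2 (0, 0)).1)
            + (if (trB (pair, s)).2.2 = (trB y).2.2 then
                (trB (pair, s)).1 * (trB y).2.1 + (trB (pair, s)).2.1 * (trB y).1 else 0)) := by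
      apply List.map_congr_left
      intro y _
      obtain ⟨q, t⟩ := y
      simp only [trB, PySem.Dict.getD_insert]
      by_cases h : t = s
      · rw [if_pos h, if_pos h.symm, h]; ring
      · have hst : ¬ s = t := fun h' => h h'.symm
        rw [if_neg h, if_neg hst]; ring
    rw [hterm, sum_map_split]
    show _ = c + pairs0 (trB (pair, s) :: r.map trB) + _
    simp only [pairs0, List.map_cons, List.sum_cons, List.map_map, Function.comp_def, trB]
    ring

-- B equals pairs0 of the zipped triples
lemma B_eq_pairs0 (sets : List (List Int)) (solution : List Int) :
    compute_sol_cost_alt sets solution = pairs0 ((sets.zip solution).map trB) := by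
  unfold compute_sol_cost_alt
  rw [csLoop_eq]
  have h0 : ((sets.zip solution).map (fun x => (trB x).1 *
      ((PySem.Dict.empty : PySem.Dict Int (Int × Int)).getD (trB x).2.2 (0, 0)).2
      + (trB x).2.1 * ((PySem.Dict.empty : PySem.Dict Int (Int × Int)).getD (trB x).2.2 (0, 0)).1)).sum = 0 := by
    simp [PySem.Dict.getD_empty]
  rw [h0]
  ring

-- under the length precondition, the indexed triples are the zipped triples
lemma triples_eq (sets : List (List Int)) (solution : List Int)
    (hlen : sets.length ≤ solution.length) :
    (PySem.List.pyRange 0 (sets.length : Int) 1).map (trA sets solution)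
      = (sets.zip solution).map trB := by
  apply List.ext_getElem
  · simp [PySem.List.length_pyRange_one]
    omega
  · intro k h1 h2
    have hk : k < sets.length := by
      simpa [PySem.List.length_pyRange_one] using h1
    have hk2 : k < solution.length := by omega
    rw [List.getElem_map, List.getElem_map, PySem.List.getElem_pyRange_one, List.getElem_zip]
    have hz : (0 : Int) + k = ((k : ℕ) : Int) := by ring
    rw [hz]
    unfold trA trB
    rw [PySem.List.pyGetD_natCast, PySem.List.pyGetD_natCast,
        List.getD_eq_getElem sets [] hk, List.getD_eq_getElem solution 0 hk2]

-- ===== VERDICT (by name: the statement is the Claim_ definition above) =====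
theorem compute_sol_cost_spec : Claim_equal_compute_sol_cost := by
  intro sets solution _ hpre
  unfold Spec_compute_sol_cost
  obtain ⟨hlen, _⟩ := hpre
  by_cases h : sets.length ≤ solution.length
  · rw [A_eq_sum, B_eq_pairs0, ← triples_eq sets solution h]
    exact rangeSum_eq_pairs0 sets solution sets.length
  · -- then sets.length ≤ 1 and solution is shorter than sets, so sets = [p], solution = []
    have h1 : sets.length ≤ 1 := hlen.resolve_left h
    rw [not_le] at h
    have hs1 : sets.length = 1 := by omega
    have hsol0 : solution.length = 0 := by omega
    obtain ⟨p, hp⟩ := List.length_eq_one_iff.mp hs1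
    have hsol : solution = [] := List.eq_nil_of_length_eq_zero hsol0
    subst hp; subst hsol
    show compute_sol_cost [p] [] = compute_sol_cost_alt [p] []
    simp [compute_sol_cost, compute_sol_cost_alt, csLoop,
      show PySem.List.pyRange 0 (1 : Int) 1 = [0] from by decide]
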